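-- pv_equiv track=rewrite | github.com/MidSix/2do_2cuatri_p | ALF/p/p1/P1_ALF_XoelSanchezDacoba_SebastianDavidMorenoExposito/miu.py | is_a_MIU_thorem
-- ===== SOURCE A (Python) =====
-- def is_a_MIU_thorem(theorem: str):
--     """
--     Procedimiento de decisión del sistema MIU.
--     Cabe aclarar que un procedimiento de dicision es una serie de pasos
--     que permitin "decidir" si un teorema dado pertenece o no a un
--     sistema/lenguaje formal. Por lo tanto esta funcion se usa
--     para determinar si una cadena es un teorema válido del sistema
--     formal MIU o no.
--     """
--     # El axioma base empieza por M, y ninguna regla añade o quita M.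
--     # Por tanto, debe tener exactamente una 'M' y estar al principio.
--     # ambos metodos str son self-explanatory.
--     if not theorem.startswith('M') or theorem.count('M') != 1:
--         return False
--
--     # Los simbolos con los que cuente el teorema deben ser parte
--     # del abecedario del lenguaje formal MIU, de no serlo, el teorema
--     # dado no podra inferirse usando este lenguaje porque al menos uno
--     # de los simbolos de los que se compone el teorema no existen en el
--     # lenguaje.
--     for char in theorem:
--         if char not in ('M', 'I', 'U'):
--             return False
--
--     # Comprobación de la invariante. Si esto varia, entonces no puede
--     # ser un teorema del lenguaje.
--     # El número de 'I's no puede ser congruente(igual a cero en modulo 3)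
--     # con 0 (módulo 3).
--     num_i = theorem.count('I')
--     if num_i % 3 == 0:
--         return False
--
--     return True
-- ===== SOURCE B (Python) =====
-- def _miu_step(state, ch):
--     """One DFA transition. States: 0 = start; 1..3 = leading 'M' seen and
--     #I mod 3 == state - 1; 4 = dead (string can never be a theorem)."""
--     if state == 0:
--         return 1 if ch == 'M' else 4
--     if 1 <= state <= 3:
--         if ch == 'U':
--             return state
--         if ch == 'I':
--             return 1 + (state % 3)
--     return 4
--
-- def is_a_MIU_thorem(theorem: str):
--     # Run a 5-state DFA over the string; the MIU theorems are exactly the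
--     # strings M(I|U)* with #I % 3 != 0, i.e. those ending in state 2 or 3.
--     state = 0
--     for ch in theorem:
--         state = _miu_step(state, ch)
--     return state in (2, 3)
-- ===== Notes on version B (the rewrite author's own statement) =====
-- stated objective: alternative
-- what changed: Replaces A's staged string scans (startswith, two count passes, a membership loop, a mod-3 test) with a 5-state deterministic finite automaton: a transition function over (state, char) is folded once over the string and acceptance is read off the final state.
import Mathlib
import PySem

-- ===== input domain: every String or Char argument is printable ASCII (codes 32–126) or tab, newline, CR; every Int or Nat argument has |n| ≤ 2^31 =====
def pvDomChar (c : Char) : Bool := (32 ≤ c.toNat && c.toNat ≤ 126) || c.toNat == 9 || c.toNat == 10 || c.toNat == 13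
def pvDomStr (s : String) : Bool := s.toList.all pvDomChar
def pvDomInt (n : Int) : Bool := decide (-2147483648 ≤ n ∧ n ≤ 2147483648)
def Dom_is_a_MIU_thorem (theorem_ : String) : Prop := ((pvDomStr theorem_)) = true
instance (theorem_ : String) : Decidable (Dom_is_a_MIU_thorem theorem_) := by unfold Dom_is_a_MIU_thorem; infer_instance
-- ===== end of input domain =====

-- B replaces A's staged scans (startswith / count passes / membership loop / mod test)
-- by a 5-state deterministic finite automaton run once over the string (objective: alternative).

-- ===== PORT A =====
def is_a_MIU_thorem (theorem_ : String) : Bool :=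
  if !(PySem.Str.startswith theorem_ "M") || PySem.Str.count theorem_ "M" ≠ 1 then false
  else if theorem_.toList.any (fun c => !(c == 'M' || c == 'I' || c == 'U')) then false
  -- the 'for char: if char not in (M,I,U): return False' loop, as the obvious any-scan
  else
    let num_i := PySem.Str.count theorem_ "I"
    if num_i % 3 == 0 then false else true

-- ===== PORT B =====
-- _miu_step: one DFA transition (0 = start, 1..3 = 'M' seen and #I mod 3 = state-1, 4 = dead)
def pvMiuStep (state : Int) (ch : Char) : Int :=
  if state = 0 then (if ch = 'M' then 1 else 4)
  else if 1 ≤ state ∧ state ≤ 3 then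
    (if ch = 'U' then state
     else if ch = 'I' then 1 + PySem.Int.mod state 3
     else 4)
  else 4

def is_a_MIU_thorem_alt (theorem_ : String) : Bool :=
  let state := theorem_.toList.foldl pvMiuStep 0
  state == 2 || state == 3

-- ===== PRECONDITION & SPEC =====
def Spec_is_a_MIU_thorem (theorem_ : String) (out : Bool) : Prop := out = is_a_MIU_thorem_alt theorem_
instance (theorem_ : String) (out : Bool) : Decidable (Spec_is_a_MIU_thorem theorem_ out) := by unfold Spec_is_a_MIU_thorem; infer_instance

-- ===== CLAIM (what is proved, stated in full; the proofs are below) =====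
def Claim_equal_is_a_MIU_thorem : Prop := ∀ (theorem_ : String), Dom_is_a_MIU_thorem theorem_ → Spec_is_a_MIU_thorem theorem_ (is_a_MIU_thorem theorem_)

-- ===== LEMMAS AND PROOFS =====

-- the dead state absorbs
theorem pvFold_dead (l : List Char) : l.foldl pvMiuStep 4 = 4 := by
  induction l with
  | nil => rfl
  | cons c l ih => simpa [List.foldl_cons, pvMiuStep] using ih

-- from a live state 1..3 the fold tracks the I-count mod 3, dying on any non-I/U char
theorem pvStep_live (k : Nat) (hk : k < 3) (c : Char) :
    pvMiuStep ((k : Int) + 1) c =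
      if c = 'U' then (k : Int) + 1
      else if c = 'I' then (((k + 1) % 3 : Nat) : Int) + 1
      else 4 := by
  unfold pvMiuStep
  rw [if_neg (by omega), if_pos (by constructor <;> omega)]
  have hmod : PySem.Int.mod ((k : Int) + 1) 3 = (((k + 1) % 3 : Nat) : Int) := by
    rw [PySem.Int.mod_eq_emod_of_pos (by omega)]
    omega
  rw [hmod]
  split_ifs <;> omega

theorem pvFold_live (l : List Char) (k : Nat) (hk : k < 3) :
    l.foldl pvMiuStep ((k : Int) + 1) =
      if l.all (fun c => c == 'I' || c == 'U')
      then (((k + l.count 'I') % 3 : Nat) : Int) + 1 else 4 := by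
  induction l generalizing k with
  | nil =>
    have h3 : (k + List.count 'I' ([] : List Char)) % 3 = k := by
      simp only [List.count_nil]
      omega
    rw [List.foldl_nil, if_pos (by simp), h3]
  | cons c l ih =>
    rw [List.foldl_cons, pvStep_live k hk c]
    by_cases hU : c = 'U'
    · rw [if_pos hU, ih k hk]
      subst hU
      have hall : (('U' :: l).all fun x => x == 'I' || x == 'U')
          = (l.all fun x => x == 'I' || x == 'U') := by simp
      have hcnt : List.count 'I' ('U' :: l) = List.count 'I' l := by simp
      rw [hall, hcnt]
    · rw [if_neg hU]
      by_cases hI : c = 'I'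
      · rw [if_pos hI, ih ((k + 1) % 3) (by omega)]
        subst hI
        have hall : (('I' :: l).all fun x => x == 'I' || x == 'U')
            = (l.all fun x => x == 'I' || x == 'U') := by simp
        have hcnt : List.count 'I' ('I' :: l) = List.count 'I' l + 1 := by simp
        rw [hall, hcnt]
        by_cases hla : (l.all fun x => x == 'I' || x == 'U') = true
        · rw [if_pos hla, if_pos hla]
          have hm : ((k + 1) % 3 + List.count 'I' l) % 3
              = (k + (List.count 'I' l + 1)) % 3 := by omega
          rw [hm]
        · rw [if_neg hla, if_neg hla]
      · rw [if_neg hI, pvFold_dead]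
        have hallf : ((c :: l).all fun x => x == 'I' || x == 'U') = false := by
          simp [hI, hU]
        rw [hallf]
        simp

theorem pvGo_single (c : Char) (fuel : Nat) : ∀ (l : List Char) (acc : Nat), l.length ≤ fuel →
    PySem.Chars.count.go [c] fuel l acc = acc + l.count c := by
  induction fuel with
  | zero => intro l acc h; rw [PySem.Chars.count.go.eq_def]
            match l with
            | [] => simp
            | x :: t => simp at h
  | succ n ih =>
    intro l acc h
    rw [PySem.Chars.count.go.eq_def]
    match l with
    | [] => simp
    | x :: t =>
      simp only [List.length_cons, Nat.succ_le_succ_iff] at h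
      by_cases hc : x = c
      · subst hc
        simp [List.isPrefixOf, ih t (acc + 1) h]
        omega
      · simp [List.isPrefixOf, Ne.symm hc, hc, ih t acc h]

theorem pvCount_single (l : List Char) (c : Char) :
    PySem.Chars.count l [c] = l.count c := by
  unfold PySem.Chars.count
  simp [pvGo_single c l.length l 0 le_rfl]

-- a string of I/U characters contains no M
theorem pvNoM (l : List Char) (h : l.all (fun c => c == 'I' || c == 'U') = true) :
    l.count 'M' = 0 := by
  simp only [List.count_eq_zero]
  intro hm
  simp only [List.all_eq_true] at h
  have := h 'M' hm
  simp at this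

-- ===== VERDICT (by name: the statement is the Claim_ definition above) =====
theorem is_a_MIU_thorem_spec : Claim_equal_is_a_MIU_thorem := by
  intro s _
  unfold Spec_is_a_MIU_thorem is_a_MIU_thorem is_a_MIU_thorem_alt
  simp only [PySem.Str.count, PySem.Str.startswith]
  have hM : "M".toList = ['M'] := rfl
  have hI : "I".toList = ['I'] := rfl
  simp only [hM, hI, pvCount_single]
  match hl : s.toList with
  | [] => simp [PySem.Chars.startswith]
  | c :: t =>
    have hsw : PySem.Chars.startswith (c :: t) ['M'] = (c == 'M') := by
      simp [PySem.Chars.startswith, List.isPrefixOf, eq_comm]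
    rw [List.foldl_cons]
    by_cases hcM : c = 'M'
    · subst hcM
      have h0 : pvMiuStep 0 'M' = ((0 : Nat) : Int) + 1 := by simp [pvMiuStep]
      rw [h0, pvFold_live t 0 (by omega)]
      by_cases hall : t.all (fun c => c == 'I' || c == 'U') = true
      · have hnoM := pvNoM t hall
        have h1 : ('M' :: t).count 'M' = 1 := by simp [hnoM]
        have hany : (('M' :: t).any fun c => !(c == 'M' || c == 'I' || c == 'U')) = false := by
          simp only [List.any_eq_false]
          intro x hx
          rcases List.mem_cons.mp hx with hx | hx
          · simp [hx]
          · simp only [List.all_eq_true] at hall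
            have := hall x hx
            rcases Bool.or_eq_true_iff.mp this with h | h <;> simp_all
        have hIcnt : ('M' :: t).count 'I' = t.count 'I' := by simp
        simp only [hsw, hall, if_true, h1, hany, hIcnt]
        by_cases h3 : t.count 'I' % 3 = 0
        · simp [h3]
        · have h12 : t.count 'I' % 3 = 1 ∨ t.count 'I' % 3 = 2 := by omega
          have hmod : (0 + t.count 'I') % 3 = t.count 'I' % 3 := by omega
          rw [hmod]
          rcases h12 with h | h <;> simp [h]
      · -- some char of t is outside {I,U}; A rejects via count M ≠ 1 or the any-scan
        rw [if_neg hall]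
        simp only [List.all_eq_true, not_forall] at hall
        obtain ⟨x, hx, hxh⟩ := hall
        by_cases hxM : x = 'M'
        · subst hxM
          have hM2 : List.count 'M' t ≠ 0 := by
            have := List.count_pos_iff.mpr hx
            omega
          simp [hsw, hM2]
        · have hany : (('M' :: t).any fun c => !(c == 'M' || c == 'I' || c == 'U')) = true := by
            simp only [List.any_eq_true]
            refine ⟨x, List.mem_cons_of_mem _ hx, ?_⟩
            simp_all
          simp only [hany]
          split <;> rfl
    · have h0 : pvMiuStep 0 c = 4 := by simp [pvMiuStep, hcM]
      rw [h0, pvFold_dead]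
      have : PySem.Chars.startswith (c :: t) ['M'] = false := by simp [hsw, hcM]
      simp [this]
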